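-- pv_equiv track=rewrite | github.com/kyungjinleelee/Algorithm | 프로그래머스/0/181890. 왼쪽 오른쪽/왼쪽 오른쪽.py | solution
-- ===== SOURCE A (Python) =====
-- def solution(str_list):
--     answer = []
--     for i in range(len(str_list)):
--         char = str_list[i]
--         if char == 'l':
--             answer = str_list[:i]
--             break
--         elif char == 'r':
--             answer = str_list[i+1:]
--             break
--     return answer
-- ===== SOURCE B (Python) =====
-- def solution(str_list):
--     # Single backward pass (right to left) over indices, as a little state
--     # machine: the state seen after position i describes the answer for the
--     # suffix starting at i, so the final state describes the whole list.
--     # kind None = no marker seen; 'l' = leftmost marker so far is 'l', with the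
--     # elements before it collected back-to-front in pre; 'r' = leftmost marker
--     # so far is 'r', at index rpos.
--     kind = None
--     pre = []
--     rpos = 0
--     for i in range(len(str_list) - 1, -1, -1):
--         h = str_list[i]
--         if h == 'l':
--             kind, pre = 'l', []
--         elif h == 'r':
--             kind, rpos = 'r', i
--         elif kind == 'l':
--             pre.append(h)
--     if kind == 'l':
--         return pre[::-1]
--     if kind == 'r':
--         return str_list[rpos + 1:]
--     return []
-- ===== Notes on version B (the rewrite author's own statement) =====
-- stated objective: alternative
-- what changed: Replaces A's forward early-breaking scan that slices at the break with a single backward state-machine pass that builds the prefix back-to-front and records the 'r' position, doing no slicing inside the loop.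
import Mathlib
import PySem

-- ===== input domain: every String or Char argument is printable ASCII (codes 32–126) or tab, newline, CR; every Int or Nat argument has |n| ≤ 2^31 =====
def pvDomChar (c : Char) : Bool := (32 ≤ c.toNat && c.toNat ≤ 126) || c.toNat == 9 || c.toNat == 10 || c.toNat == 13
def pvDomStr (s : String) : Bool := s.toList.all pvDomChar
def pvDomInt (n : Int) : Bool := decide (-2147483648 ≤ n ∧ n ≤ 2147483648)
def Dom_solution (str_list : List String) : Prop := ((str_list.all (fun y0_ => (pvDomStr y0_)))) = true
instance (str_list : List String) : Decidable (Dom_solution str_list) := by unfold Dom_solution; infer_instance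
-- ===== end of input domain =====

-- B replaces A's early-breaking forward loop with a single backward state-machine pass that builds the prefix back-to-front and records the 'r' position, slicing nothing inside the loop; objective: alternative.


-- ===== PORT A =====
-- the for-loop with break, as structural recursion on the index
def solutionGo (str_list : List String) (i : Nat) : List String :=
  if h : i < str_list.length then
    let char := str_list[i]
    if char = "l" then PySem.List.slice str_list none (some (i : Int))
    else if char = "r" then PySem.List.slice str_list (some ((i : Int) + 1)) none
    else solutionGo str_list (i + 1)
  else []
termination_by str_list.length - i

def solution (str_list : List String) : List String := solutionGo str_list 0

-- ===== PORT B =====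
-- one iteration of Source B's backward loop; state = (kind, pre, rpos).
-- str_list[i] is ported with pyGetD: the loop only ever passes in-range indices.
def solutionAltStep (str_list : List String) (st : Option String × List String × Int)
    (i : Int) : Option String × List String × Int :=
  let h := PySem.List.pyGetD str_list i ""
  if h = "l" then (some "l", [], st.2.2)
  else if h = "r" then (some "r", st.2.1, i)
  else if st.1 = some "l" then (st.1, st.2.1 ++ [h], st.2.2)
  else st

def solution_alt (str_list : List String) : List String :=
  let st := (PySem.List.pyRange ((str_list.length : Int) - 1) (-1) (-1)).foldl
    (solutionAltStep str_list) (none, [], 0)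
  if st.1 = some "l" then st.2.1.reverse
  else if st.1 = some "r" then PySem.List.slice str_list (some (st.2.2 + 1)) none
  else []

-- ===== PRECONDITION & SPEC =====
def Spec_solution (str_list : List String) (out : List String) : Prop := out = solution_alt str_list
instance (str_list : List String) (out : List String) : Decidable (Spec_solution str_list out) := by unfold Spec_solution; infer_instance

-- ===== CLAIM =====
def Claim_equal_solution : Prop := ∀ (str_list : List String), Dom_solution str_list → Spec_solution str_list (solution str_list)

-- ===== LEMMAS AND PROOFS =====

-- proof-side bridge: the outcome for a suffix, as a structural recursion
-- (none = no marker; some ("l", pre) / some ("r", suf))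
def solutionAltGo : List String → Option (String × List String)
  | [] => none
  | h :: t =>
    if h = "l" then some ("l", [])
    else if h = "r" then some ("r", t)
    else
      match solutionAltGo t with
      | none => none
      | some (kind, body) =>
        if kind = "l" then some ("l", h :: body) else some (kind, body)

-- A's loop from index i computes the bridge's value on the remaining suffix
theorem solutionGo_eq (xs : List String) (i : Nat) :
    solutionGo xs i =
      match solutionAltGo (xs.drop i) with
      | none => []
      | some (k, body) => if k = "l" then xs.take i ++ body else body := by
  unfold solutionGo
  by_cases h : i < xs.length
  · rw [dif_pos h]
    have hdrop : xs.drop i = xs[i] :: xs.drop (i + 1) :=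
      (List.getElem_cons_drop h).symm
    by_cases hl : xs[i] = "l"
    · rw [if_pos hl, hdrop, hl]
      simp only [solutionAltGo, PySem.List.slice_to_natCast, if_true, List.append_nil]
    · by_cases hr : xs[i] = "r"
      · rw [if_neg hl, if_pos hr, hdrop, hr]
        have hc : ((i : Int) + 1) = ((i + 1 : Nat) : Int) := by push_cast; ring
        rw [hc, PySem.List.slice_from_natCast]
        simp only [solutionAltGo, if_true,
          if_neg (show ("r" : String) ≠ "l" by decide)]
      · rw [if_neg hl, if_neg hr]
        have ih := solutionGo_eq xs (i + 1)
        rw [ih, hdrop]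
        simp only [solutionAltGo, if_neg hl, if_neg hr]
        cases hrec : solutionAltGo (xs.drop (i + 1)) with
        | none => rfl
        | some p =>
          obtain ⟨k, body⟩ := p
          by_cases hk : k = "l"
          · subst hk
            have htake : xs.take (i + 1) = xs.take i ++ [xs[i]] :=
              List.take_succ_eq_append_getElem h
            simp only [if_true, htake, List.append_assoc, List.singleton_append]
          · simp only [if_neg hk]
  · rw [dif_neg h]
    rw [List.drop_eq_nil_of_le (Nat.le_of_not_lt h)]
    rfl
termination_by xs.length - i

-- the backward loop's state after it has processed indices n-1 down to j
def foldState (xs : List String) (j : Nat) : Option String × List String × Int :=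
  if h : j < xs.length then solutionAltStep xs (foldState xs (j + 1)) (j : Int)
  else (none, [], 0)
termination_by xs.length - j

-- range(n-1, -1, -1) in closed form
theorem pyRange_desc (n : Nat) :
    PySem.List.pyRange ((n : Int) - 1) (-1) (-1)
      = (List.range n).map (fun k : Nat => (n : Int) - 1 - (k : Int)) := by
  rcases Nat.eq_zero_or_pos n with h | h
  · subst h; simp [PySem.List.pyRange]
  · have hfun : (fun k : Nat => (n : Int) - 1 + -1 * (k : Int))
        = (fun k : Nat => (n : Int) - 1 - (k : Int)) := funext fun k => by ring
    simp only [PySem.List.pyRange]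
    rw [if_neg (show ((-1 : Int) = 0) → False by decide),
      if_neg (show ((0 : Int) < -1) → False by decide),
      if_pos (by omega : (-1 : Int) < (n : Int) - 1)]
    have hc : (((n : Int) - 1 - (-1) + -(-1) - 1) / -(-1)).toNat = n := by
      norm_num
    rw [hc, ← hfun]

-- folding the first m descending indices reaches the state at position n - m
theorem foldl_range_desc (xs : List String) (m : Nat) (hm : m ≤ xs.length) :
    ((List.range m).map (fun k : Nat => (xs.length : Int) - 1 - (k : Int))).foldl
        (solutionAltStep xs) (none, [], 0)
      = foldState xs (xs.length - m) := by
  induction m with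
  | zero =>
    rw [foldState, dif_neg (by omega)]
    rfl
  | succ m ih =>
    rw [List.range_succ, List.map_append, List.foldl_append, ih (by omega)]
    conv_rhs => rw [foldState]
    rw [dif_pos (show xs.length - (m + 1) < xs.length by omega)]
    have h1 : xs.length - (m + 1) + 1 = xs.length - m := by omega
    have h2 : ((xs.length - (m + 1) : Nat) : Int) = (xs.length : Int) - 1 - (m : Int) := by
      omega
    rw [h1, h2]
    rfl

-- the state at position j realises the bridge's outcome for the suffix from j
theorem foldState_eq (xs : List String) (j : Nat) :
    match solutionAltGo (xs.drop j) with
    | none => foldState xs j = (none, [], 0)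
    | some (k, body) =>
        (foldState xs j).1 = some k ∧
        (k = "l" → (foldState xs j).2.1.reverse = body) ∧
        (k = "r" → 0 ≤ (foldState xs j).2.2 ∧
          xs.drop ((foldState xs j).2.2.toNat + 1) = body) := by
  by_cases h : j < xs.length
  · have hdrop : xs.drop j = xs[j] :: xs.drop (j + 1) :=
      (List.getElem_cons_drop h).symm
    have hst : foldState xs j = solutionAltStep xs (foldState xs (j + 1)) (j : Int) := by
      rw [foldState, dif_pos h]
    have hget : PySem.List.pyGetD xs (j : Int) "" = xs[j] := by
      rw [PySem.List.pyGetD_natCast]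
      exact List.getD_eq_getElem xs "" h
    have ih := foldState_eq xs (j + 1)
    by_cases hl : xs[j] = "l"
    · rw [hdrop, hl]
      simp only [solutionAltGo, if_true]
      have hj : foldState xs j = (some "l", [], (foldState xs (j + 1)).2.2) := by
        rw [hst]
        simp only [solutionAltStep, hget, hl, if_true]
      refine ⟨?_, fun _ => ?_, fun hlr => absurd hlr (by decide)⟩
      · rw [hj]
      · rw [hj]
        rfl
    · by_cases hr : xs[j] = "r"
      · rw [hdrop, hr]
        simp only [solutionAltGo, if_true, if_neg (show ("r" : String) ≠ "l" by decide)]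
        have hj : foldState xs j = (some "r", (foldState xs (j + 1)).2.1, (j : Int)) := by
          rw [hst]
          simp only [solutionAltStep, hget, hr,
            if_neg (show ("r" : String) ≠ "l" by decide), if_true]
        refine ⟨by rw [hj], fun hlr => absurd hlr (by decide), fun _ => ⟨?_, ?_⟩⟩
        · rw [hj]
          exact Int.natCast_nonneg j
        · rw [hj]
          show xs.drop ((j : Int).toNat + 1) = xs.drop (j + 1)
          rw [Int.toNat_natCast]
      · rw [hdrop]
        simp only [solutionAltGo, if_neg hl, if_neg hr]
        have hstep : foldState xs j =
            (if (foldState xs (j + 1)).1 = some "l"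
              then ((foldState xs (j + 1)).1, (foldState xs (j + 1)).2.1 ++ [xs[j]],
                    (foldState xs (j + 1)).2.2)
              else foldState xs (j + 1)) := by
          rw [hst]
          simp only [solutionAltStep, hget, if_neg hl, if_neg hr]
        cases hrec : solutionAltGo (xs.drop (j + 1)) with
        | none =>
          rw [hrec] at ih
          have hne : (foldState xs (j + 1)).1 ≠ some "l" := by
            rw [ih]
            decide
          show foldState xs j = (none, [], 0)
          rw [hstep, if_neg hne, ih]
        | some p =>
          obtain ⟨k, body⟩ := p
          rw [hrec] at ih
          obtain ⟨ihk, ihl, ihr⟩ := ih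
          by_cases hk : k = "l"
          · subst hk
            have hj : foldState xs j =
                ((foldState xs (j + 1)).1, (foldState xs (j + 1)).2.1 ++ [xs[j]],
                  (foldState xs (j + 1)).2.2) := by
              rw [hstep, if_pos ihk]
            refine ⟨?_, fun _ => ?_, fun hlr => absurd hlr (by decide)⟩
            · rw [hj]
              exact ihk
            · rw [hj]
              show ((foldState xs (j + 1)).2.1 ++ [xs[j]]).reverse = xs[j] :: body
              rw [List.reverse_append, List.reverse_singleton, List.singleton_append,
                ihl rfl]
          · have hne : (foldState xs (j + 1)).1 ≠ some "l" := by
              rw [ihk]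
              simp [hk]
            have hj : foldState xs j = foldState xs (j + 1) := by
              rw [hstep, if_neg hne]
            have hred : (match some (k, body) with
                | none => none
                | some (kind, body) =>
                  if kind = "l" then some ("l", xs[j] :: body) else some (kind, body))
                = some (k, body) := by
              show (if k = "l" then some ("l", xs[j] :: body) else some (k, body))
                = some (k, body)
              rw [if_neg hk]
            rw [hred]
            refine ⟨?_, fun hlr => absurd hlr hk, fun hrr => ?_⟩
            · rw [hj]
              exact ihk
            · rw [hj]
              exact ihr hrr
  · have hdrop : xs.drop j = [] := List.drop_eq_nil_of_le (Nat.le_of_not_lt h)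
    rw [hdrop]
    show foldState xs j = (none, [], 0)
    rw [foldState, dif_neg h]
termination_by xs.length - j

-- the bridge only ever tags with "l" or "r"
theorem solutionAltGo_tag (xs : List String) : ∀ (k : String) (body : List String),
    solutionAltGo xs = some (k, body) → k = "l" ∨ k = "r" := by
  induction xs with
  | nil =>
    intro k body h
    simp [solutionAltGo] at h
  | cons x t ih =>
    intro k body h
    simp only [solutionAltGo] at h
    split_ifs at h with h1 h2
    · simp only [Option.some.injEq, Prod.mk.injEq] at h
      exact Or.inl h.1.symm
    · simp only [Option.some.injEq, Prod.mk.injEq] at h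
      exact Or.inr h.1.symm
    · cases hrec : solutionAltGo t with
      | none =>
        rw [hrec] at h
        simp at h
      | some p =>
        obtain ⟨k', body'⟩ := p
        rw [hrec] at h
        have h' : (if k' = "l" then some ("l", x :: body') else some (k', body'))
            = some (k, body) := h
        by_cases hk' : k' = "l"
        · rw [if_pos hk'] at h'
          simp only [Option.some.injEq, Prod.mk.injEq] at h'
          exact Or.inl h'.1.symm
        · rw [if_neg hk'] at h'
          simp only [Option.some.injEq, Prod.mk.injEq] at h'
          rw [← h'.1]
          exact ih k' body' hrec

-- ===== VERDICT =====
theorem solution_spec : Claim_equal_solution := by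
  intro xs _
  show solution xs = solution_alt xs
  have hA := solutionGo_eq xs 0
  simp only [List.drop_zero, List.take_zero, List.nil_append, ite_self] at hA
  have hfold : (PySem.List.pyRange ((xs.length : Int) - 1) (-1) (-1)).foldl
      (solutionAltStep xs) (none, [], 0) = foldState xs 0 := by
    rw [pyRange_desc, foldl_range_desc xs xs.length le_rfl, Nat.sub_self]
  have hinv := foldState_eq xs 0
  rw [List.drop_zero] at hinv
  unfold solution solution_alt
  rw [hA, hfold]
  cases hgo : solutionAltGo xs with
  | none =>
    rw [hgo] at hinv
    rw [hinv]
    rfl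
  | some p =>
    obtain ⟨k, body⟩ := p
    rw [hgo] at hinv
    obtain ⟨ihk, ihl, ihr⟩ := hinv
    rcases solutionAltGo_tag xs k body hgo with hk | hk
    · subst hk
      rw [if_pos ihk]
      exact (ihl rfl).symm
    · subst hk
      have hne : (foldState xs 0).1 ≠ some "l" := by
        rw [ihk]
        decide
      obtain ⟨hpos, hbody⟩ := ihr rfl
      rw [if_neg hne, if_pos ihk]
      have hs : PySem.List.slice xs (some ((foldState xs 0).2.2 + 1)) none
          = xs.drop ((foldState xs 0).2.2 + 1).toNat :=
        PySem.List.slice_from xs (by omega)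
      rw [hs]
      have ht : ((foldState xs 0).2.2 + 1).toNat = (foldState xs 0).2.2.toNat + 1 := by
        omega
      rw [ht]
      exact hbody.symm
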